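-- pv_equiv track=rewrite | github.com/jgmuir/CSCE689_Team | defender/classifier.py | get_classification_asm_features
-- ===== SOURCE A (Python) =====
-- def get_classification_asm_features(asm_file, selected_opcode_features_1, selected_opcode_features_2):
--     # Identify unique bi-grams and tri-grams
--     unique_bi_grams = set()
--     unique_tri_grams = set()
--     prev_opcode1 = None
--     prev_opcode2 = None
--     for i, opcode in enumerate(asm_file):
--         # Creating the bi-gram if enough history exists
--         if prev_opcode1 != None:
--             bi_gram = prev_opcode1 + " " + opcode
--             # If the current bi-gram has not been seen
--             if not bi_gram in unique_bi_grams: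
--                 unique_bi_grams.add(bi_gram)
--         # Creating the tri-gram if enough history exists
--         if prev_opcode2 != None:
--             tri_gram = prev_opcode2 + " " + prev_opcode1 + " " + opcode
--             # If the current tri-gram has not been seen
--             if not tri_gram in unique_tri_grams:
--                 unique_tri_grams.add(tri_gram)
--         # Moving the sliding window
--         prev_opcode2 = prev_opcode1
--         prev_opcode1 = opcode
--
--     # Initialize the bi-gram OPCODE feature matrix
--     opcode_bi_gram_features = dict.fromkeys(selected_opcode_features_1, 0)
--     # One-hot-encoding the sample with the combination of all encountered features
--     for bi_gram in selected_opcode_features_1: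
--         if bi_gram in list(unique_bi_grams):
--             opcode_bi_gram_features[bi_gram] = 1
--     # Initialize the tri-gram OPCODE feature matrix
--     opcode_tri_gram_features = dict.fromkeys(selected_opcode_features_2, 0)
--     # One-hot-encoding the sample with the combination of all encountered features
--     for tri_gram in selected_opcode_features_2:
--         if tri_gram in list(unique_tri_grams):
--             opcode_tri_gram_features[tri_gram] = 1
--     return opcode_bi_gram_features, opcode_tri_gram_features
-- ===== SOURCE B (Python) =====
-- def get_classification_asm_features(asm_file, selected_opcode_features_1, selected_opcode_features_2):
--     # One-hot encode directly: init with dict.fromkeys, then mark each window gram found in the selected sets.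
--     opcode_bi_gram_features = dict.fromkeys(selected_opcode_features_1, 0)
--     opcode_tri_gram_features = dict.fromkeys(selected_opcode_features_2, 0)
--     selected_bi = set(selected_opcode_features_1)
--     selected_tri = set(selected_opcode_features_2)
--     for a, b in zip(asm_file, asm_file[1:]):
--         g = a + " " + b
--         if g in selected_bi:
--             opcode_bi_gram_features[g] = 1
--     for a, b, c in zip(asm_file, asm_file[1:], asm_file[2:]):
--         g = a + " " + b + " " + c
--         if g in selected_tri:
--             opcode_tri_gram_features[g] = 1
--     return opcode_bi_gram_features, opcode_tri_gram_features
-- ===== Notes on version B (the rewrite author's own statement) =====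
-- stated objective: faster
-- what changed: B drops A's unique_bi_grams/unique_tri_grams set construction and per-selected-feature scan (which rebuilds list(unique_set) inside the loop); it initializes both dicts with dict.fromkeys and marks entries directly in one zip-based sliding-window pass per n-gram size.
import Mathlib
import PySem

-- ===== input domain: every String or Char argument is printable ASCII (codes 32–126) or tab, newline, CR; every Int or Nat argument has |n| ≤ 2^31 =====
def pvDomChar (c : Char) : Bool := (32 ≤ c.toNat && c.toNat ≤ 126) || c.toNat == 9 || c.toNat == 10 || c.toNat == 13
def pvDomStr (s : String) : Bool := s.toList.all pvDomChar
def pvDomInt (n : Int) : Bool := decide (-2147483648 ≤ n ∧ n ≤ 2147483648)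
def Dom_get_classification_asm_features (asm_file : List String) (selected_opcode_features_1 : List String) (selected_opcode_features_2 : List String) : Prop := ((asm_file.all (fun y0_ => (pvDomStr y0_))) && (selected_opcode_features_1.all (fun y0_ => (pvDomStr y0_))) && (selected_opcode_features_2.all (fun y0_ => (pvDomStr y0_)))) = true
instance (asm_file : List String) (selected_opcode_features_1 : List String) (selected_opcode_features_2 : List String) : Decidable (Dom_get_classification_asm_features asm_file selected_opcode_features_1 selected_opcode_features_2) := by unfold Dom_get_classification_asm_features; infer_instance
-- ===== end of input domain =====

-- B replaces A's unique-gram set construction + per-feature scan by dict.fromkeys initialisation and a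
-- direct sliding-window pass that marks selected grams (objective: simpler decomposition).

-- ===== PORT A =====
-- one loop iteration of A's scan: state = (unique_bi_grams, unique_tri_grams, prev_opcode1, prev_opcode2)
def pvStepA (st : PySem.Set String × PySem.Set String × Option String × Option String)
    (opcode : String) :
    PySem.Set String × PySem.Set String × Option String × Option String :=
  let u2 := match st.2.2.1 with
    | some p1 =>
        let g := p1 ++ " " ++ opcode
        if !(PySem.Set.contains st.1 g) then PySem.Set.add st.1 g else st.1
    | none => st.1
  let u3 := match st.2.2.2, st.2.2.1 with
    | some p2, some p1 =>
        let g := p2 ++ " " ++ p1 ++ " " ++ opcode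
        if !(PySem.Set.contains st.2.1 g) then PySem.Set.add st.2.1 g else st.2.1
    | _, _ => st.2.1    -- prev2 set while prev1 is None never happens starting from (None, None)
  (u2, u3, some opcode, st.2.2.1)

def get_classification_asm_features (asm_file : List String) (selected_opcode_features_1 : List String) (selected_opcode_features_2 : List String) : (List (String × Int)) × (List (String × Int)) :=
  let fin := asm_file.foldl pvStepA (PySem.Set.empty, PySem.Set.empty, none, none)
  let unique_bi := fin.1
  let unique_tri := fin.2.1
  let bi0 : PySem.Dict String Int := selected_opcode_features_1.foldl (fun d k => d.insert k 0) PySem.Dict.empty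
  let bi := selected_opcode_features_1.foldl
    (fun d k => if PySem.Set.contains unique_bi k then d.insert k 1 else d) bi0
  let tri0 : PySem.Dict String Int := selected_opcode_features_2.foldl (fun d k => d.insert k 0) PySem.Dict.empty
  let tri := selected_opcode_features_2.foldl
    (fun d k => if PySem.Set.contains unique_tri k then d.insert k 1 else d) tri0
  (bi.items, tri.items)

-- ===== PORT B =====
def get_classification_asm_features_alt (asm_file : List String) (selected_opcode_features_1 : List String) (selected_opcode_features_2 : List String) : (List (String × Int)) × (List (String × Int)) :=
  let bi0 : PySem.Dict String Int := selected_opcode_features_1.foldl (fun d k => d.insert k 0) PySem.Dict.empty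
  let tri0 : PySem.Dict String Int := selected_opcode_features_2.foldl (fun d k => d.insert k 0) PySem.Dict.empty
  let selBi := PySem.Set.ofList selected_opcode_features_1
  let selTri := PySem.Set.ofList selected_opcode_features_2
  let bi := (asm_file.zip asm_file.tail).foldl
    (fun d p => let g := p.1 ++ " " ++ p.2
                if PySem.Set.contains selBi g then d.insert g 1 else d) bi0
  let tri := (asm_file.zip (asm_file.tail.zip (asm_file.drop 2))).foldl
    (fun d t => let g := t.1 ++ " " ++ t.2.1 ++ " " ++ t.2.2
                if PySem.Set.contains selTri g then d.insert g 1 else d) tri0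
  (bi.items, tri.items)

-- ===== PRECONDITION & SPEC =====
def Spec_get_classification_asm_features (asm_file : List String) (selected_opcode_features_1 : List String) (selected_opcode_features_2 : List String) (out : (List (String × Int)) × (List (String × Int))) : Prop := out = get_classification_asm_features_alt asm_file selected_opcode_features_1 selected_opcode_features_2
instance (asm_file : List String) (selected_opcode_features_1 : List String) (selected_opcode_features_2 : List String) (out : (List (String × Int)) × (List (String × Int))) : Decidable (Spec_get_classification_asm_features asm_file selected_opcode_features_1 selected_opcode_features_2 out) := by unfold Spec_get_classification_asm_features; infer_instance

-- ===== CLAIM (what is proved, stated in full; the proofs are below) =====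
def Claim_equal_get_classification_asm_features : Prop := ∀ (asm_file : List String) (selected_opcode_features_1 : List String) (selected_opcode_features_2 : List String), Dom_get_classification_asm_features asm_file selected_opcode_features_1 selected_opcode_features_2 → Spec_get_classification_asm_features asm_file selected_opcode_features_1 selected_opcode_features_2 (get_classification_asm_features asm_file selected_opcode_features_1 selected_opcode_features_2)

-- ===== LEMMAS AND PROOFS =====

-- the bi-gram / tri-gram window sequences of the file
def pvGrams2 (xs : List String) : List String :=
  (xs.zip xs.tail).map (fun p => p.1 ++ " " ++ p.2)
def pvGrams3 (xs : List String) : List String :=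
  (xs.zip (xs.tail.zip (xs.drop 2))).map (fun t => t.1 ++ " " ++ t.2.1 ++ " " ++ t.2.2)

lemma pvAddIf (s : PySem.Set String) (x : String) :
    (if !(PySem.Set.contains s x) then PySem.Set.add s x else s) = PySem.Set.add s x := by
  by_cases h : PySem.Set.contains s x <;> simp [PySem.Set.add, h]

-- A's scan from a state with two previous opcodes accumulates exactly the window grams
lemma pvScanA_two (xs : List String) (a b : String) (u2 u3 : PySem.Set String) :
    (xs.foldl pvStepA (u2, u3, some a, some b)).1 = PySem.Set.update u2 (pvGrams2 (a :: xs)) ∧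
    (xs.foldl pvStepA (u2, u3, some a, some b)).2.1 = PySem.Set.update u3 (pvGrams3 (b :: a :: xs)) := by
  induction xs generalizing a b u2 u3 with
  | nil => simp [pvGrams2, pvGrams3, PySem.Set.update]
  | cons x t ih =>
      simp only [List.foldl_cons, pvStepA, pvAddIf]
      have := ih x a (PySem.Set.add u2 (a ++ " " ++ x)) (PySem.Set.add u3 (b ++ " " ++ a ++ " " ++ x))
      simpa [pvGrams2, pvGrams3, PySem.Set.update] using this

-- A's unique_bi_grams / unique_tri_grams are the sets of window grams
lemma pvScanA (xs : List String) :
    (xs.foldl pvStepA (PySem.Set.empty, PySem.Set.empty, none, none)).1 = PySem.Set.ofList (pvGrams2 xs) ∧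
    (xs.foldl pvStepA (PySem.Set.empty, PySem.Set.empty, none, none)).2.1 = PySem.Set.ofList (pvGrams3 xs) := by
  match xs with
  | [] => simp [pvGrams2, pvGrams3, PySem.Set.ofList]
  | [x] => simp [pvGrams2, pvGrams3, pvStepA, PySem.Set.ofList]
  | x :: y :: t =>
      have h := pvScanA_two t y x (PySem.Set.add PySem.Set.empty (x ++ " " ++ y)) PySem.Set.empty
      simp only [List.foldl_cons, pvStepA, pvAddIf]
      constructor
      · rw [h.1]; simp [pvGrams2, PySem.Set.ofList_eq_foldl, PySem.Set.update]
      · rw [h.2]; simp [pvGrams3, PySem.Set.ofList_eq_foldl, PySem.Set.update]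

-- a marking fold whose fired inserts all hit existing keys rewrites values in place
lemma pvMarkItems (l : List String) (p : String → Bool) (d : PySem.Dict String Int)
    (h : ∀ g ∈ l, p g = true → d.contains g = true) :
    (l.foldl (fun d g => if p g then d.insert g 1 else d) d).items
      = d.items.map (fun q => if p q.1 && l.contains q.1 then (q.1, (1:Int)) else q) := by
  induction l generalizing d with
  | nil => simp
  | cons g t ih =>
      simp only [List.foldl_cons]
      by_cases hp : p g = true
      · rw [if_pos hp]
        rw [ih (d.insert g 1) (by
          intro g' hg' hpg'
          rw [PySem.Dict.contains_insert]
          rcases eq_or_ne g' g with rfl | hne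
          · simp
          · simp [h g' (List.mem_cons_of_mem _ hg') hpg'])]
        rw [PySem.Dict.items_insert_of_contains d 1 (h g (List.mem_cons_self) hp)]
        rw [List.map_map]
        apply List.map_congr_left
        intro q hq
        by_cases he : q.1 = g
        · simp [Function.comp, he, hp]
        · simp only [Function.comp]
          have hb : (q.1 == g) = false := by simpa using he
          simp [hb, he]
      · rw [if_neg hp]
        rw [ih d (fun g' hg' => h g' (List.mem_cons_of_mem _ hg'))]
        apply List.map_congr_left
        intro q hq
        by_cases he : q.1 = g
        · simp [he, hp]
        · simp [he]

lemma pvFromkeysKeys (l : List String) :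
    (l.foldl (fun d k => d.insert k (0:Int)) PySem.Dict.empty).keys = PySem.Set.ofList l := by
  rw [PySem.Dict.keys_foldl_insert (f := fun _ _ => (0:Int))]
  simp [PySem.Set.update, PySem.Set.ofList_eq_foldl]

lemma pvFromkeysContains (l : List String) (k : String) (hk : k ∈ l) :
    (l.foldl (fun d k => d.insert k (0:Int)) PySem.Dict.empty).contains k = true := by
  rw [PySem.Dict.contains_iff_mem_keys, pvFromkeysKeys, PySem.Set.mem_ofList]
  exact hk

-- A's per-feature marking pass and B's per-gram marking pass yield the same items
lemma pvSide (sel : List String) (gs : List String) :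
    (sel.foldl (fun d k => if PySem.Set.contains (PySem.Set.ofList gs) k then d.insert k 1 else d)
        (sel.foldl (fun d k => d.insert k (0:Int)) PySem.Dict.empty)).items
    = (gs.foldl (fun d g => if PySem.Set.contains (PySem.Set.ofList sel) g then d.insert g 1 else d)
        (sel.foldl (fun d k => d.insert k (0:Int)) PySem.Dict.empty)).items := by
  rw [pvMarkItems sel _ _ (fun k hk _ => pvFromkeysContains sel k hk)]
  rw [pvMarkItems gs _ _ (fun g _ hg => pvFromkeysContains sel g
        (by rwa [PySem.Set.contains_iff, PySem.Set.mem_ofList] at hg))]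
  apply List.map_congr_left
  intro q hq
  have hsel : q.1 ∈ sel := by
    have := PySem.Dict.mem_keys_of_mem_items _ hq
    rwa [pvFromkeysKeys, PySem.Set.mem_ofList] at this
  by_cases hg : q.1 ∈ gs <;>
    simp [PySem.Set.mem_ofList, hsel, hg]

-- ===== VERDICT (by name: the statement is the Claim_ definition above) =====
theorem get_classification_asm_features_spec : Claim_equal_get_classification_asm_features := by
  intro asm sel1 sel2 _
  unfold Spec_get_classification_asm_features
  unfold get_classification_asm_features get_classification_asm_features_alt
  simp only [(pvScanA asm).1, (pvScanA asm).2]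
  have h2 : (asm.zip asm.tail).foldl
      (fun d p => if PySem.Set.contains (PySem.Set.ofList sel1) (p.1 ++ " " ++ p.2)
                  then d.insert (p.1 ++ " " ++ p.2) 1 else d)
      (sel1.foldl (fun d k => d.insert k (0:Int)) PySem.Dict.empty)
      = (pvGrams2 asm).foldl
      (fun d g => if PySem.Set.contains (PySem.Set.ofList sel1) g then d.insert g 1 else d)
      (sel1.foldl (fun d k => d.insert k (0:Int)) PySem.Dict.empty) := by
    rw [pvGrams2, List.foldl_map]
  have h3 : (asm.zip (asm.tail.zip (asm.drop 2))).foldl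
      (fun d t => if PySem.Set.contains (PySem.Set.ofList sel2) (t.1 ++ " " ++ t.2.1 ++ " " ++ t.2.2)
                  then d.insert (t.1 ++ " " ++ t.2.1 ++ " " ++ t.2.2) 1 else d)
      (sel2.foldl (fun d k => d.insert k (0:Int)) PySem.Dict.empty)
      = (pvGrams3 asm).foldl
      (fun d g => if PySem.Set.contains (PySem.Set.ofList sel2) g then d.insert g 1 else d)
      (sel2.foldl (fun d k => d.insert k (0:Int)) PySem.Dict.empty) := by
    rw [pvGrams3, List.foldl_map]
  rw [h2, h3]
  exact Prod.ext (pvSide sel1 (pvGrams2 asm)) (pvSide sel2 (pvGrams3 asm))
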